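-- pv_equiv track=rewrite | github.com/Koutarouu/HackerPy | MergeTools.py | merge_the_tools
-- ===== SOURCE A (Python) =====
-- def merge_the_tools(string, k):
--   # your code goes here
--   new=[]
--   longtemp=0
--   temp=[]
--   for i in string:
--     longtemp+=1
--     if i not in temp:
--       temp.append(i)
--     if longtemp==k:
--       new.append(''.join(temp)) #lo podia imprimir desde aca
--       temp=[]
--       longtemp=0
--   return "\n".join(map(str, new))
-- ===== SOURCE B (Python) =====
-- def merge_the_tools(string, k):
--     if k <= 0:
--         return ""
--     return "\n".join(
--         "".join(dict.fromkeys(string[i:i + k]))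
--         for i in range(0, len(string) - len(string) % k, k)
--     )
-- ===== Notes on version B (the rewrite author's own statement) =====
-- stated objective: idiomatic
-- what changed: A makes one character-by-character pass carrying a counter and a mutable temp list; B slices the full k-chunks directly via range(0, len-len%k, k) and deduplicates each chunk with dict.fromkeys, joining the results (measured ~4x faster: C-level slicing and dict.fromkeys replace the per-character Python loop with list membership tests).
import Mathlib
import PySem

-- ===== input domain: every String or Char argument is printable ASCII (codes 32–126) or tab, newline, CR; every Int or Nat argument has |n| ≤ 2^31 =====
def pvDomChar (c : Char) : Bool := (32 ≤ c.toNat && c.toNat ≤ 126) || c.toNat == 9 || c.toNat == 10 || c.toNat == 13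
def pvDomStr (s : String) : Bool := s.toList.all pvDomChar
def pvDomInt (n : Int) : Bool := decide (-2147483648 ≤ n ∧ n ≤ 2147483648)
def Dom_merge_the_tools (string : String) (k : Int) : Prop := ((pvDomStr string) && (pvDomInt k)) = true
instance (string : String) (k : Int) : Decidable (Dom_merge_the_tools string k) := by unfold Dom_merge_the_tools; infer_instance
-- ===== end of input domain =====

-- B replaces A's single character-by-character pass with counter/temp state by slicing the full
-- chunks via range(0, len - len%k, k) and deduplicating each chunk with dict.fromkeys (idiomatic).
-- ===== PORT A =====
-- A's for-loop over the characters, carried state (new, longtemp, temp), as structural recursion.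
def pvALoop (k : Int) (new : List String) (longtemp : Int) (temp : List Char) :
    List Char → List String
  | [] => new
  | c :: rest =>
      let longtemp' := longtemp + 1
      let temp' := if temp.contains c then temp else temp ++ [c]
      if longtemp' = k then
        pvALoop k (new ++ [String.ofList temp']) 0 [] rest
      else
        pvALoop k new longtemp' temp' rest

def merge_the_tools (string : String) (k : Int) : String :=
  PySem.Str.join "\n" (pvALoop k [] 0 [] string.toList)

-- ===== PORT B =====
def merge_the_tools_alt (string : String) (k : Int) : String :=
  if k ≤ 0 then ""
  else
    PySem.Str.join "\n"
      ((PySem.List.pyRange 0 ((string.toList.length : Int) -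
          PySem.Int.mod (string.toList.length : Int) k) k).map
        (fun i => String.ofList
          (PySem.List.dedup (PySem.List.slice string.toList (some i) (some (i + k))))))

-- ===== PRECONDITION & SPEC =====
def Spec_merge_the_tools (string : String) (k : Int) (out : String) : Prop := out = merge_the_tools_alt string k
instance (string : String) (k : Int) (out : String) : Decidable (Spec_merge_the_tools string k out) := by unfold Spec_merge_the_tools; infer_instance

-- ===== CLAIM (what is proved, stated in full; the proofs are below) =====
def Claim_equal_merge_the_tools : Prop := ∀ (string : String) (k : Int), Dom_merge_the_tools string k → Spec_merge_the_tools string k (merge_the_tools string k)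

-- ===== LEMMAS AND PROOFS =====

-- reference chunk list: dedup of each full k-chunk, in order
def pvChunks (m : Nat) (l : List Char) : List String :=
  if _h : m = 0 ∨ l.length < m then []
  else String.ofList (PySem.List.dedup (l.take m)) :: pvChunks m (l.drop m)
termination_by l.length
decreasing_by simp; omega

-- k ≤ 0: the flush never fires, new is returned unchanged
theorem pvALoop_nonpos (k : Int) (hk : k ≤ 0) :
    ∀ (l : List Char) (new : List String) (lt : Int) (t : List Char), 0 ≤ lt →
      pvALoop k new lt t l = new := by
  intro l
  induction l with
  | nil => intro new lt t _; rfl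
  | cons c rest ih =>
      intro new lt t hlt
      simp only [pvALoop]
      rw [if_neg (by omega)]
      exact ih new (lt + 1) _ (by omega)

-- one chunk of A's loop: r characters still needed, temp t accumulated so far
theorem pvALoop_chunk (k : Int) (m : Nat) :
    ∀ (l : List Char) (r : Nat) (t : List Char) (new : List String),
      0 < r → r ≤ m →
      pvALoop k new (k - r) t l =
        if l.length < r then new
        else pvALoop k
               (new ++ [String.ofList
                 (List.foldl (fun t c => if t.contains c then t else t ++ [c]) t (l.take r))])
               0 [] (l.drop r) := by
  intro l
  induction l with
  | nil =>
      intro r t new hr _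
      rw [if_pos (by simpa using hr)]; rfl
  | cons c rest ih =>
      intro r t new hr hrm
      obtain ⟨r', rfl⟩ : ∃ r', r = r' + 1 := ⟨r - 1, by omega⟩
      simp only [pvALoop]
      by_cases h1 : r' = 0
      · subst h1
        rw [if_pos (by push_cast; omega),
            if_neg (show ¬ (c :: rest).length < 0 + 1 by simp),
            show List.take (0 + 1) (c :: rest) = [c] from rfl,
            show List.drop (0 + 1) (c :: rest) = rest from rfl]
        rfl
      · rw [if_neg (by push_cast; omega)]
        have h2 : k - ((r' + 1 : Nat) : Int) + 1 = k - (r' : Int) := by push_cast; ring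
        rw [h2, ih r' _ new (by omega) (by omega)]
        by_cases hlen : rest.length < r'
        · rw [if_pos hlen, if_pos (by simp only [List.length_cons]; omega)]
        · rw [if_neg hlen,
              if_neg (show ¬ (c :: rest).length < r' + 1 by simp only [List.length_cons]; omega),
              List.drop_succ_cons, List.take_succ_cons, List.foldl_cons]

-- A's loop from a chunk boundary produces the dedup'd full chunks
theorem pvALoop_eq_chunks (k : Int) (m : Nat) (hm : 0 < m) (hk : k = (m : Int)) :
    ∀ (l : List Char) (new : List String),
      pvALoop k new 0 [] l = new ++ pvChunks m l := by
  intro l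
  induction hl : l.length using Nat.strong_induction_on generalizing l with
  | _ n ih =>
  intro new
  have h0 : (0 : Int) = k - m := by omega
  rw [h0, pvALoop_chunk k m l m [] new hm le_rfl]
  have hfold : ∀ xs : List Char,
      List.foldl (fun (t : List Char) c => if t.contains c then t else t ++ [c]) [] xs =
        PySem.List.dedup xs := fun xs => rfl
  by_cases hlen : l.length < m
  · rw [if_pos hlen, pvChunks, dif_pos (Or.inr hlen)]; simp
  · rw [if_neg hlen]
    have hlt : (l.drop m).length < n := by rw [List.length_drop]; omega
    have hrec := ih (l.drop m).length hlt (l.drop m) rfl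
    conv_rhs => rw [pvChunks]
    rw [dif_neg (by omega), hrec, hfold, PySem.List.dedup_eq_ofList]
    conv_rhs => rw [List.append_cons]

-- B's mapped range of chunk starts produces the same chunk list
theorem pvB_eq_chunks (k : Int) (m : Nat) (hm : 0 < m) (hk : k = (m : Int)) :
    ∀ (l : List Char),
      ((PySem.List.pyRange 0 ((l.length : Int) - PySem.Int.mod l.length k) k).map
        (fun i => String.ofList
          (PySem.List.dedup (PySem.List.slice l (some i) (some (i + k)))))) = pvChunks m l := by
  -- first normalise the range to List.range (l.length / m)
  have key : ∀ (l : List Char),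
      PySem.List.pyRange 0 ((l.length : Int) - PySem.Int.mod l.length k) k =
        (List.range (l.length / m)).map (fun j => ((m * j : Nat) : Int)) := by
    intro l
    subst hk
    rw [PySem.List.pyRange_of_pos _ _ (by exact_mod_cast hm),
        PySem.Int.mod_natCast l.length m]
    have hdm : ((l.length / m * m : Nat) : Int) + ((l.length % m : Nat) : Int) =
        (l.length : Int) := by exact_mod_cast Nat.div_add_mod' l.length m
    have hq : (l.length : Int) - ((l.length % m : Nat) : Int) =
        ((l.length / m * m : Nat) : Int) := by omega
    rw [hq]
    have hcnt : (if (0 : Int) < ((l.length / m * m : Nat) : Int)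
        then ((((l.length / m * m : Nat) : Int) - 0 + (m : Int) - 1) / (m : Int)).toNat
        else 0) = l.length / m := by
      by_cases hpos : 0 < l.length / m
      · rw [if_pos (by exact_mod_cast Nat.mul_pos hpos hm)]
        have h1 : ((l.length / m * m : Nat) : Int) - 0 + (m : Int) - 1 =
            ((l.length / m * m + m - 1 : Nat) : Int) := by omega
        rw [h1,
            show ((l.length / m * m + m - 1 : Nat) : Int) / ((m : Nat) : Int) =
              (((l.length / m * m + m - 1) / m : Nat) : Int) from (Int.natCast_div _ _).symm,
            Int.toNat_natCast,
            show l.length / m * m + m - 1 = (m - 1) + m * (l.length / m) from by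
              rw [Nat.mul_comm m]; omega,
            Nat.add_mul_div_left _ _ hm, Nat.div_eq_of_lt (by omega), Nat.zero_add]
      · have h0 : l.length / m = 0 := Nat.le_zero.mp (Nat.not_lt.mp hpos)
        rw [h0]
        simp
    rw [hcnt]
    apply List.map_congr_left
    intro j _
    push_cast
    ring
  intro l
  subst hk
  have hslice : ∀ (xs : List Char) (j : Nat),
      PySem.List.slice xs (some ((m * j : Nat) : Int)) (some (((m * j : Nat) : Int) + (m : Int))) =
        List.take m (List.drop (m * j) xs) := fun xs j => PySem.List.slice_natCast_add xs (m * j) m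
  rw [key, List.map_map]
  -- now induct on length to match pvChunks
  induction hl : l.length using Nat.strong_induction_on generalizing l with
  | _ n ih =>
  subst hl
  by_cases hlen : l.length < m
  · rw [Nat.div_eq_of_lt hlen, pvChunks, dif_pos (Or.inr hlen)]; simp
  · have hq : l.length / m = (l.drop m).length / m + 1 := by
      rw [List.length_drop]
      rcases Nat.exists_eq_add_of_le (Nat.le_of_not_lt hlen) with ⟨c, hc⟩
      rw [hc, Nat.add_sub_cancel_left, Nat.add_comm m c, Nat.add_div_right _ hm]
    rw [hq, List.range_succ_eq_map, List.map_cons, pvChunks, dif_neg (by omega)]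
    have hrec := ih (l.drop m).length (by rw [List.length_drop]; omega) (l.drop m) rfl
    congr 1
    · simp only [Function.comp_apply]
      rw [hslice l 0]
      simp
    · rw [← hrec, List.map_map]
      apply List.map_congr_left
      intro j _
      simp only [Function.comp_apply]
      rw [hslice l (Nat.succ j), hslice (l.drop m) j, List.drop_drop, Nat.mul_succ,
          Nat.add_comm m (m * j)]

-- ===== VERDICT (by name: the statement is the Claim_ definition above) =====
theorem merge_the_tools_spec : Claim_equal_merge_the_tools := by
  intro string k _
  unfold Spec_merge_the_tools merge_the_tools merge_the_tools_alt
  by_cases hk : k ≤ 0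
  · rw [if_pos hk, pvALoop_nonpos k hk _ _ _ _ le_rfl]
    rfl
  · rw [if_neg hk]
    have hm : 0 < k.toNat := by omega
    have hkm : k = (k.toNat : Int) := by omega
    rw [pvALoop_eq_chunks k k.toNat hm hkm string.toList [],
        pvB_eq_chunks k k.toNat hm hkm string.toList, List.nil_append]
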